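-- pv_equiv track=rewrite | github.com/solarfrii/algorithms | test.py | _parse_test
-- ===== SOURCE A (Python) =====
-- def _parse_test(lines: [str]) -> [str, str]:
--     input, output = [], []
--     accumulator = input
--     for line in [l.strip() for l in lines]:
--         if len(line) == 0:
--             accumulator = output
--             continue
--         label, line = line.split(':')
--         line = line.strip()
--         accumulator.append(line)
--     return input, output
-- ===== SOURCE B (Python) =====
-- def _parse_test(lines: [str]) -> [str, str]:
--     stripped = [l.strip() for l in lines]
--     try:
--         first_blank = stripped.index('')
--     except ValueError:
--         first_blank = len(stripped)
--
--     def section(part):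
--         result = []
--         for s in part:
--             if s:
--                 label, value = s.split(':')
--                 result.append(value.strip())
--         return result
--
--     return section(stripped[:first_blank]), section(stripped[first_blank:])
-- ===== Notes on version B (the rewrite author's own statement) =====
-- stated objective: simpler
-- what changed: Replaces the stateful accumulator-swapping loop by partitioning the stripped lines at the first blank line and parsing each section independently with one shared helper.
import Mathlib
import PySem

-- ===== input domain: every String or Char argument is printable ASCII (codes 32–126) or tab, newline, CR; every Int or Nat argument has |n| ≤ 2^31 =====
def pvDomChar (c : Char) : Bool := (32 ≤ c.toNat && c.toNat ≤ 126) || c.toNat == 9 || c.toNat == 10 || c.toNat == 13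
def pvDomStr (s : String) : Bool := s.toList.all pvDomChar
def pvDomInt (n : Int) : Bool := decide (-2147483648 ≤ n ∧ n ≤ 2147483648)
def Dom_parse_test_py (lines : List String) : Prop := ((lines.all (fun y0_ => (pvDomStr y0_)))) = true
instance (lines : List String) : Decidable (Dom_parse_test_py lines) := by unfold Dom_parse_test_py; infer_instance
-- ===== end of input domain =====

-- B replaces A's stateful accumulator-swapping loop by partitioning the stripped
-- lines at the first blank line and parsing each section with one shared helper (objective: simpler).

-- ===== PORT A =====
-- loop body of A: state is (input, output, switched?); 'label, line = line.split(':')'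
-- raises unless exactly 2 parts — those inputs are excluded by Pre_, the port takes parts[1] via getD there
def pvStepA (st : List String × List String × Bool) (line : String) : List String × List String × Bool :=
  if PySem.Str.len line = 0 then (st.1, st.2.1, true)
  else
    let v := PySem.Str.strip (((PySem.Str.split? line ":").getD []).getD 1 "")
    if st.2.2 then (st.1, st.2.1 ++ [v], true) else (st.1 ++ [v], st.2.1, false)

def parse_test_py (lines : List String) : List String × List String :=
  let r := (lines.map (fun l => PySem.Str.strip l)).foldl pvStepA ([], [], false)
  (r.1, r.2.1)

-- ===== PORT B =====
-- 'section' helper of B: parse the non-blank lines of one section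
def pvSection (part : List String) : List String :=
  (part.filter (fun s => !(s == ""))).map
    (fun s => PySem.Str.strip (((PySem.Str.split? s ":").getD []).getD 1 ""))

def parse_test_py_alt (lines : List String) : List String × List String :=
  let stripped := lines.map (fun l => PySem.Str.strip l)
  let firstBlank := stripped.findIdx (fun s => s == "")   -- .index(''), length if absent
  (pvSection (stripped.take firstBlank), pvSection (stripped.drop firstBlank))

-- ===== PRECONDITION & SPEC =====
-- Pre_ excludes exactly the inputs on which Python A raises ValueError:
-- a non-blank stripped line whose split(':') does not have exactly two parts.
def Pre_parse_test_py (lines : List String) : Prop :=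
  ∀ l ∈ lines, PySem.Str.strip l ≠ "" →
    ((PySem.Str.split? (PySem.Str.strip l) ":").getD []).length = 2
instance (lines : List String) : Decidable (Pre_parse_test_py lines) := by unfold Pre_parse_test_py; infer_instance
def pvWitness_parse_test_py : List String := ["a: 1", " b:2", "", "c: 3"]

def Spec_parse_test_py (lines : List String) (out : List String × List String) : Prop := out = parse_test_py_alt lines
instance (lines : List String) (out : List String × List String) : Decidable (Spec_parse_test_py lines out) := by unfold Spec_parse_test_py; infer_instance

-- ===== CLAIM (what is proved, stated in full; the proofs are below) =====
def Claim_equal_parse_test_py : Prop := ∀ (lines : List String), Dom_parse_test_py lines → Pre_parse_test_py lines → Spec_parse_test_py lines (parse_test_py lines)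

-- ===== LEMMAS AND PROOFS =====

-- after the switch, the fold just appends the parsed non-blank lines to output
theorem foldA_true (L : List String) (inp out : List String) :
    L.foldl pvStepA (inp, out, true) = (inp, out ++ pvSection L, true) := by
  induction L generalizing out with
  | nil => simp [pvSection]
  | cons h t ih =>
    by_cases hb : h = ""
    · simp [hb, pvStepA, pvSection, PySem.Str.len, ih]
    · simp [pvStepA, hb, ih, pvSection]

-- before the switch, the fold splits at the first blank line
theorem foldA_false (L : List String) (inp out : List String) :
    (L.foldl pvStepA (inp, out, false)).1 = inp ++ pvSection (L.take (L.findIdx (fun s => s == ""))) ∧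
    (L.foldl pvStepA (inp, out, false)).2.1 = out ++ pvSection (L.drop (L.findIdx (fun s => s == ""))) := by
  induction L generalizing inp out with
  | nil => simp [pvSection]
  | cons h t ih =>
    by_cases hb : h = ""
    · simp [hb, pvStepA, PySem.Str.len, List.findIdx_cons, foldA_true, pvSection]
    · have hbe : (h == "") = false := by simpa using hb
      simp [pvStepA, hb, hbe, List.findIdx_cons, ih, pvSection]

-- ===== VERDICT (by name: the statement is the Claim_ definition above) =====
theorem parse_test_py_spec : Claim_equal_parse_test_py := by
  intro lines _ _
  unfold Spec_parse_test_py parse_test_py parse_test_py_alt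
  obtain ⟨h1, h2⟩ := foldA_false (lines.map (fun l => PySem.Str.strip l)) [] []
  simp only [h1, h2, List.nil_append]
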